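-- pv_equiv track=rewrite | github.com/igorvlnascimento/OpenNRE | example/finetune_llm_with_rl.py | validate_sentence
-- ===== SOURCE A (Python) =====
-- def validate_sentence(tokenized_sentence):
--     indexes = [-1, -1, -1, -1]
--     for i, token in enumerate(tokenized_sentence):
--         if '<SUB>' in token and indexes[0] == -1:
--             indexes[0] = i
--         if '</SUB>' in token and indexes[1] == -1:
--             indexes[1] = i
--         if '<OBJ>' in token and indexes[2] == -1:
--             indexes[2] = i
--         if '</OBJ>' in token and indexes[3] == -1:
--             indexes[3] = i
--     sorted_indexes = indexes[:]
--     sorted_indexes.sort()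
--     return indexes.count(-1) <= 1 and sorted_indexes == indexes, indexes
-- ===== SOURCE B (Python) =====
-- def _first_index(tokens, marker):
--     for i, t in enumerate(tokens):
--         if marker in t:
--             return i
--     return -1
--
-- def validate_sentence(tokenized_sentence):
--     indexes = [_first_index(tokenized_sentence, m)
--                for m in ('<SUB>', '</SUB>', '<OBJ>', '</OBJ>')]
--     return indexes.count(-1) <= 1 and sorted(indexes) == indexes, indexes
-- ===== Notes on version B (the rewrite author's own statement) =====
-- stated objective: idiomatic
-- what changed: Replaces the single interleaved scan maintaining four -1-guarded slots with a small first-index helper called once per marker (four independent early-return scans), and drops the explicit copy-and-sort in favour of sorted(indexes) == indexes.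
import Mathlib
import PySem

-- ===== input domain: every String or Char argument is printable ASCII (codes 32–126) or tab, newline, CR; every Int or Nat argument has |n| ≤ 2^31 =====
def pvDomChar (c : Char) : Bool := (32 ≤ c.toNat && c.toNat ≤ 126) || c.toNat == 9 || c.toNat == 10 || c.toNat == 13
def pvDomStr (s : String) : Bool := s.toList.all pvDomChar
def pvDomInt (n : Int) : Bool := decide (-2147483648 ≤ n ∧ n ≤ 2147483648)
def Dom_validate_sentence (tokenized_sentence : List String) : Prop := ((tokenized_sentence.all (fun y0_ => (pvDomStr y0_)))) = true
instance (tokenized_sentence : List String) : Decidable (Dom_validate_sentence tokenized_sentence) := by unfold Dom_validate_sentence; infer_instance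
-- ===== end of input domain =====

-- B computes each marker's first index with an independent early-return scan per marker
-- (idiomatic decomposition) instead of A's single interleaved loop over four guarded slots.


-- ===== PORT A =====
-- one step of A's loop body: the four guarded slot updates, in order
def vsStepA (st : Int × Int × Int × Int) (p : Int × String) : Int × Int × Int × Int :=
  let (a, b, c, d) := st
  let a := if PySem.Str.isIn "<SUB>" p.2 && a == -1 then p.1 else a
  let b := if PySem.Str.isIn "</SUB>" p.2 && b == -1 then p.1 else b
  let c := if PySem.Str.isIn "<OBJ>" p.2 && c == -1 then p.1 else c
  let d := if PySem.Str.isIn "</OBJ>" p.2 && d == -1 then p.1 else d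
  (a, b, c, d)

def validate_sentence (tokenized_sentence : List String) : Bool × List Int :=
  let st := (PySem.List.enumerate tokenized_sentence 0).foldl vsStepA (-1, -1, -1, -1)
  let indexes : List Int := [st.1, st.2.1, st.2.2.1, st.2.2.2]
  let sorted_indexes := PySem.List.sorted indexes (fun x => x) false
  (decide (PySem.List.count indexes (-1) ≤ 1) && (sorted_indexes == indexes), indexes)

-- ===== PORT B =====
-- B's helper: first index i (from counter n) whose token contains marker, else -1
def vsFirstIndex (tokens : List String) (marker : String) (n : Int) : Int :=
  match tokens with
  | [] => -1
  | t :: rest => if PySem.Str.isIn marker t then n else vsFirstIndex rest marker (n + 1)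

def validate_sentence_alt (tokenized_sentence : List String) : Bool × List Int :=
  let indexes : List Int :=
    ["<SUB>", "</SUB>", "<OBJ>", "</OBJ>"].map (fun m => vsFirstIndex tokenized_sentence m 0)
  (decide (PySem.List.count indexes (-1) ≤ 1) &&
    (PySem.List.sorted indexes (fun x => x) false == indexes), indexes)

-- ===== PRECONDITION & SPEC =====
def Spec_validate_sentence (tokenized_sentence : List String) (out : Bool × List Int) : Prop := out = validate_sentence_alt tokenized_sentence
instance (tokenized_sentence : List String) (out : Bool × List Int) : Decidable (Spec_validate_sentence tokenized_sentence out) := by unfold Spec_validate_sentence; infer_instance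

-- ===== CLAIM (what is proved, stated in full; the proofs are below) =====
def Claim_equal_validate_sentence : Prop := ∀ (tokenized_sentence : List String), Dom_validate_sentence tokenized_sentence → Spec_validate_sentence tokenized_sentence (validate_sentence tokenized_sentence)

-- ===== LEMMAS AND PROOFS =====

-- A's fold fills each still-empty slot with that marker's first index from n
theorem vs_fold_eq (tokens : List String) (n a b c d : Int) (hn : 0 ≤ n) :
    (PySem.List.enumerate tokens n).foldl vsStepA (a, b, c, d) =
      ((if a == -1 then vsFirstIndex tokens "<SUB>" n else a),
       (if b == -1 then vsFirstIndex tokens "</SUB>" n else b),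
       (if c == -1 then vsFirstIndex tokens "<OBJ>" n else c),
       (if d == -1 then vsFirstIndex tokens "</OBJ>" n else d)) := by
  induction tokens generalizing n a b c d with
  | nil => simp [PySem.List.enumerate_nil, vsFirstIndex]
  | cons t rest ih =>
    rw [PySem.List.enumerate_cons, List.foldl_cons]
    rw [show vsStepA (a, b, c, d) (n, t) =
      ((if PySem.Str.isIn "<SUB>" t && a == -1 then n else a),
       (if PySem.Str.isIn "</SUB>" t && b == -1 then n else b),
       (if PySem.Str.isIn "<OBJ>" t && c == -1 then n else c),
       (if PySem.Str.isIn "</OBJ>" t && d == -1 then n else d)) from rfl]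
    rw [ih (n + 1) _ _ _ _ (by omega)]
    have key : ∀ (m : String) (x : Int),
        (if (if PySem.Str.isIn m t && x == -1 then n else x) == -1
          then vsFirstIndex rest m (n + 1)
          else (if PySem.Str.isIn m t && x == -1 then n else x)) =
        (if x == -1 then vsFirstIndex (t :: rest) m n else x) := by
      intro m x
      simp only [vsFirstIndex]
      rcases Bool.eq_false_or_eq_true (PySem.Str.isIn m t) with hm | hm <;> rw [hm] <;>
        by_cases hx : x = -1 <;> simp [hx, show n ≠ -1 from by omega]
    rw [key "<SUB>" a, key "</SUB>" b, key "<OBJ>" c, key "</OBJ>" d]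

-- ===== VERDICT (by name: the statement is the Claim_ definition above) =====
theorem validate_sentence_spec : Claim_equal_validate_sentence := by
  intro ts _
  show validate_sentence ts = validate_sentence_alt ts
  unfold validate_sentence validate_sentence_alt
  rw [vs_fold_eq ts 0 (-1) (-1) (-1) (-1) le_rfl]
  rfl
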